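-- pv_equiv track=rewrite | github.com/pengyuanzhi/AI-DevOps | src/core/quality/cpp/clang_tidy_checker.py | _determine_category
-- ===== SOURCE A (Python) =====
-- from typing import Any, Dict, List, Optional
--
-- def _determine_category(rule_id: Optional[str], message: str) -> str:
--     """根据规则 ID 确定类别"""
--     if not rule_id:
--         return "style"
--
--     rule_id_lower = rule_id.lower()
--
--     # 内存安全
--     if any(prefix in rule_id_lower for prefix in [
--         "clang-analyzer-security",
--         "cert-msc",
--         "cppcoreguidelines-pro-type-reinterpret-cast",
--         "cppcoreguidelines-pro-bounds-array-to-pointer-decay",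
--     ]):
--         return "memory"
--
--     # 性能
--     if rule_id_lower.startswith("performance-"):
--         return "performance"
--
--     # 现代 C++
--     if rule_id_lower.startswith("modernize-"):
--         return "modern-cpp"
--
--     # 线程安全
--     if any(prefix in rule_id_lower for prefix in [
--         "cert-msc",  # Concurrency
--         "cppcoreguidelines-pro-type-reinterpret-cast",
--     ]):
--         return "thread-safety"
--
--     # 默认为风格
--     return "style"
-- ===== SOURCE B (Python) =====
-- # Data-driven rule table replacing the if-chain; the unreachable thread-safety
-- # branch (its patterns are a subset of the memory patterns) is omitted.
-- _RULES = [
--     (True,  ["clang-analyzer-security", "cert-msc",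
--              "cppcoreguidelines-pro-type-reinterpret-cast",
--              "cppcoreguidelines-pro-bounds-array-to-pointer-decay"], "memory"),
--     (False, ["performance-"], "performance"),
--     (False, ["modernize-"], "modern-cpp"),
-- ]
--
--
-- def _determine_category(rule_id, message):
--     if not rule_id:
--         return "style"
--     r = rule_id.lower()
--     for contains, pats, cat in _RULES:
--         if any((p in r) if contains else r.startswith(p) for p in pats):
--             return cat
--     return "style"
-- ===== Notes on version B (the rewrite author's own statement) =====
-- stated objective: simpler
-- what changed: Replaced the hard-coded if-chain with a data-driven rule table (match-kind, patterns, category) scanned by one generic first-match loop, dropping the unreachable thread-safety branch whose patterns are a subset of the memory patterns.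
import Mathlib
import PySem

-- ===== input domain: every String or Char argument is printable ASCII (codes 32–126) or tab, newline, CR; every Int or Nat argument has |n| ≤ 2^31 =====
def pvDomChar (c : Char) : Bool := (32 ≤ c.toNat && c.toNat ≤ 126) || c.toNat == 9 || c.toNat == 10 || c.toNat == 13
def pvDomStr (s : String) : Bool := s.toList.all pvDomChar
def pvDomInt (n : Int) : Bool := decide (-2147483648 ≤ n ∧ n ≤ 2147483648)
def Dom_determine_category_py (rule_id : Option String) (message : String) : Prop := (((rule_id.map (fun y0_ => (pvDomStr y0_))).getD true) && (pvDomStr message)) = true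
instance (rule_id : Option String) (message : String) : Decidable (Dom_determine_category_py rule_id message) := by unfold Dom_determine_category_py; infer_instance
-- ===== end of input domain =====

-- B replaces A's hard-coded if-chain by a data-driven rule table scanned by one
-- first-match pass, omitting A's unreachable thread-safety branch (simpler, same cost).

-- ===== PORT A =====
def determine_category_py (rule_id : Option String) (message : String) : String :=
  match rule_id with
  | none => "style"
  | some s =>
    if s = "" then "style"
    else
      let rule_id_lower := PySem.Str.lower s
      if [ "clang-analyzer-security", "cert-msc",
           "cppcoreguidelines-pro-type-reinterpret-cast",
           "cppcoreguidelines-pro-bounds-array-to-pointer-decay"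
         ].any (fun pre => PySem.Str.isIn pre rule_id_lower) then "memory"
      else if PySem.Str.startswith rule_id_lower "performance-" then "performance"
      else if PySem.Str.startswith rule_id_lower "modernize-" then "modern-cpp"
      else if [ "cert-msc", "cppcoreguidelines-pro-type-reinterpret-cast"
              ].any (fun pre => PySem.Str.isIn pre rule_id_lower) then "thread-safety"
      else "style"

-- ===== PORT B =====
-- B: data-driven rule table, scanned by a single first-match pass (simpler decomposition).
def pvRuleTable : List (Bool × List String × String) :=
  [ (true,  [ "clang-analyzer-security", "cert-msc",
              "cppcoreguidelines-pro-type-reinterpret-cast",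
              "cppcoreguidelines-pro-bounds-array-to-pointer-decay" ], "memory"),
    (false, ["performance-"], "performance"),
    (false, ["modernize-"], "modern-cpp") ]

def determine_category_py_alt (rule_id : Option String) (message : String) : String :=
  match rule_id with
  | none => "style"
  | some s =>
    if s = "" then "style"
    else
      let r := PySem.Str.lower s
      match pvRuleTable.find? (fun e =>
          e.2.1.any (fun p => if e.1 then PySem.Str.isIn p r else PySem.Str.startswith r p)) with
      | some e => e.2.2
      | none => "style"

-- ===== PRECONDITION & SPEC =====
def Spec_determine_category_py (rule_id : Option String) (message : String) (out : String) : Prop := out = determine_category_py_alt rule_id message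
instance (rule_id : Option String) (message : String) (out : String) : Decidable (Spec_determine_category_py rule_id message out) := by unfold Spec_determine_category_py; infer_instance

-- ===== CLAIM (what is proved, stated in full; the proofs are below) =====
def Claim_equal_determine_category_py : Prop := ∀ (rule_id : Option String) (message : String), Dom_determine_category_py rule_id message → Spec_determine_category_py rule_id message (determine_category_py rule_id message)

-- ===== LEMMAS AND PROOFS =====

-- ===== VERDICT (by name: the statement is the Claim_ definition above) =====
theorem determine_category_py_spec : Claim_equal_determine_category_py := by
  intro rule_id message _
  unfold Spec_determine_category_py determine_category_py determine_category_py_alt pvRuleTable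
  match rule_id with
  | none => rfl
  | some s =>
    by_cases hs : s = ""
    · simp [hs]
    · simp only [if_neg hs]
      by_cases h1 : PySem.Str.isIn "clang-analyzer-security" (PySem.Str.lower s) = true <;>
      by_cases h2 : PySem.Str.isIn "cert-msc" (PySem.Str.lower s) = true <;>
      by_cases h3 : PySem.Str.isIn "cppcoreguidelines-pro-type-reinterpret-cast" (PySem.Str.lower s) = true <;>
      by_cases h4 : PySem.Str.isIn "cppcoreguidelines-pro-bounds-array-to-pointer-decay" (PySem.Str.lower s) = true <;>
      by_cases h5 : PySem.Str.startswith (PySem.Str.lower s) "performance-" = true <;>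
      by_cases h6 : PySem.Str.startswith (PySem.Str.lower s) "modernize-" = true <;>
      simp only [List.find?, List.any_cons, List.any_nil, Bool.or_false] <;>
      simp_all
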